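-- pv_equiv track=rewrite | github.com/enro-ff/educoderAutoComplete | encoderAutoComplete_app(python)/streantest.py | clean_code_response
-- ===== SOURCE A (Python) =====
-- def clean_code_response(response):
--     """
--     清理API响应，确保只包含代码
--     """
--     # 移除可能存在的代码块标记
--     lines = response.split('\n')
--     cleaned_lines = []
--
--     in_code_block = False
--     for line in lines:
--         # 跳过代码块开始标记
--         if line.strip().startswith('```'):
--             in_code_block = not in_code_block
--             continue
--
--         # 如果在代码块中或者是普通代码行，则保留
--         if in_code_block or (line.strip() and not line.strip().startswith('//') and not line.strip().startswith('#')):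
--             cleaned_lines.append(line)
--
--     cleaned_response = '\n'.join(cleaned_lines).strip()
--
--     # 如果清理后为空，返回原始响应
--     return cleaned_response if cleaned_response else response
-- ===== SOURCE B (Python) =====
-- def clean_code_response(response):
--     # Segment the lines at fence markers, then filter each segment by its parity.
--     segments = []
--     cur = []
--     for line in response.split('\n'):
--         if line.strip().startswith('```'):
--             segments.append(cur)
--             cur = []
--         else:
--             cur.append(line)
--     segments.append(cur)
--
--     kept = []
--     inside = False
--     for seg in segments:
--         if inside:
--             kept.extend(seg)
--         else:
--             kept.extend(l for l in seg
--                         if l.strip() and not l.strip().startswith('//')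
--                         and not l.strip().startswith('#'))
--         inside = not inside
--
--     out = '\n'.join(kept).strip()
--     return out if out else response
-- ===== Notes on version B (the rewrite author's own statement) =====
-- stated objective: alternative
-- what changed: Replaces A's single stateful pass (a boolean in_code_block toggled inline) by a two-phase decomposition: first split the lines into segments at fence lines, then render segments by parity (odd segments kept verbatim, even segments filtered).
import Mathlib
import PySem

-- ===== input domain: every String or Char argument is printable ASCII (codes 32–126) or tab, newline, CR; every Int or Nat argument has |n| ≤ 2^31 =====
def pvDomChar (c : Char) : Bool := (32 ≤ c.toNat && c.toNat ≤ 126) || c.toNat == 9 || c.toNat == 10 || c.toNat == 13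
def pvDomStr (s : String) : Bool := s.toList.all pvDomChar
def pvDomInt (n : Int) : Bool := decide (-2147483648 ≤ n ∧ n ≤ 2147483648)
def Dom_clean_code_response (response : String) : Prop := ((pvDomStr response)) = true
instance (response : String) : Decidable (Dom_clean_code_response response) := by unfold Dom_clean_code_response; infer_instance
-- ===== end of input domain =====

-- B replaces A's single stateful fence-toggling pass by a segment-then-render decomposition (objective: alternative; same cost).

-- response.split('\n'): exact via PySem.Chars.splitOn (sep is nonempty)
def pvSplitLines (response : String) : List String :=
  (PySem.Chars.splitOn response.toList ['\n']).map String.ofList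

-- line.strip().startswith('```')
def pvFence (line : String) : Bool :=
  PySem.Str.startswith (PySem.Str.strip line) "```"

-- line.strip() and not line.strip().startswith('//') and not line.strip().startswith('#')
def pvKeep (line : String) : Bool :=
  decide (PySem.Str.strip line ≠ "") &&
  !PySem.Str.startswith (PySem.Str.strip line) "//" &&
  !PySem.Str.startswith (PySem.Str.strip line) "#"

-- ===== PORT A =====
-- A's for-loop: one pass with the in_code_block boolean, appending kept lines.
def pvALoop : List String → Bool → List String
  | [], _ => []
  | l :: rest, b =>
    if pvFence l then pvALoop rest (!b)
    else if b || pvKeep l then l :: pvALoop rest b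
    else pvALoop rest b

def clean_code_response (response : String) : String :=
  let lines := pvSplitLines response
  let cleaned := PySem.Str.strip (PySem.Str.join "\n" (pvALoop lines false))
  if cleaned ≠ "" then cleaned else response

-- ===== PORT B =====
-- Phase 1 of Source B: split the lines into segments at fence lines (first segment, later segments).
def pvSegs : List String → List String × List (List String)
  | [] => ([], [])
  | l :: rest =>
    let s := pvSegs rest
    if pvFence l then ([], s.1 :: s.2) else (l :: s.1, s.2)

-- Phase 2 of Source B: render segments by parity — inside segments verbatim, outside ones filtered.
def pvRender : Bool → List (List String) → List String
  | _, [] => []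
  | inside, seg :: rest =>
    (if inside then seg else seg.filter pvKeep) ++ pvRender (!inside) rest

def clean_code_response_alt (response : String) : String :=
  let s := pvSegs (pvSplitLines response)
  let out := PySem.Str.strip (PySem.Str.join "\n" (pvRender false (s.1 :: s.2)))
  if out ≠ "" then out else response

-- ===== PRECONDITION & SPEC =====
def Spec_clean_code_response (response : String) (out : String) : Prop := out = clean_code_response_alt response
instance (response : String) (out : String) : Decidable (Spec_clean_code_response response out) := by unfold Spec_clean_code_response; infer_instance

-- ===== CLAIM (what is proved, stated in full; the proofs are below) =====
def Claim_equal_clean_code_response : Prop := ∀ (response : String), Dom_clean_code_response response → Spec_clean_code_response response (clean_code_response response)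

-- ===== LEMMAS AND PROOFS =====
theorem pvALoop_eq_render (ls : List String) :
    ∀ b, pvALoop ls b = pvRender b ((pvSegs ls).1 :: (pvSegs ls).2) := by
  induction ls with
  | nil => intro b; cases b <;> simp [pvALoop, pvSegs, pvRender]
  | cons l rest ih =>
    intro b
    by_cases hf : pvFence l = true
    · simp [pvALoop, pvSegs, pvRender, hf, ih]
    · simp only [pvALoop, pvSegs, hf, Bool.false_eq_true, if_false]
      cases b with
      | true => simp [pvRender, ih]
      | false =>
        by_cases hk : pvKeep l = true <;>
          simp [pvRender, ih, hk]

-- ===== VERDICT (by name: the statement is the Claim_ definition above) =====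
theorem clean_code_response_spec : Claim_equal_clean_code_response := by
  intro response _
  unfold Spec_clean_code_response clean_code_response clean_code_response_alt
  simp only [pvALoop_eq_render]
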